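-- pv_equiv track=rewrite | github.com/samhotchkiss/promptmaster | src/pollypm/store/title_contract.py | _lookup_tag
-- ===== SOURCE A (Python) =====
-- _TAG_TABLE: tuple[tuple[tuple[str | None, str | None], str], ...] = (
--     # Specific (tier, type) pairs first.
--     (("immediate", "notify"), "[Action]"),
--     (("digest", "notify"), "[FYI]"),
--     # ``silent`` tier is always audit regardless of type.
--     (("silent", None), "[Audit]"),
--     # Type-driven fallbacks (no tier match above).
--     ((None, "alert"), "[Alert]"),
--     ((None, "inbox_task"), "[Task]"),
-- )
--
-- def _lookup_tag(tier: str | None, type: str | None) -> str: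
--     """Return the bracket tag string for ``(tier, type)``.
--
--     Falls back to ``[Note]`` when nothing matches so we never emit a
--     tagless subject — the contract is "every subject starts with a
--     bracket tag", and a silent default is safer than raising.
--     """
--     tier_norm = (tier or "").strip().lower() or None
--     type_norm = (type or "").strip().lower() or None
--     for (want_tier, want_type), tag in _TAG_TABLE:
--         tier_ok = want_tier is None or want_tier == tier_norm
--         type_ok = want_type is None or want_type == type_norm
--         if tier_ok and type_ok:
--             return tag
--     return "[Note]"
-- ===== SOURCE B (Python) =====
-- # Staged hash dispatch: exact-pair dict, then tier-only dict, then type-only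
-- # dict, chained with `or` (all tags are truthy). Equivalent to the priority
-- # table because its rules partition into exactly these three key kinds in
-- # this precedence order.
-- _PAIR_TAGS = {
--     ("immediate", "notify"): "[Action]",
--     ("digest", "notify"): "[FYI]",
-- }
-- _TIER_TAGS = {"silent": "[Audit]"}
-- _TYPE_TAGS = {"alert": "[Alert]", "inbox_task": "[Task]"}
--
--
-- def _lookup_tag(tier, type):
--     tier_norm = (tier or "").strip().lower() or None
--     type_norm = (type or "").strip().lower() or None
--     return (
--         _PAIR_TAGS.get((tier_norm, type_norm))
--         or _TIER_TAGS.get(tier_norm)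
--         or _TYPE_TAGS.get(type_norm)
--         or "[Note]"
--     )
-- ===== Notes on version B (the rewrite author's own statement) =====
-- stated objective: alternative
-- what changed: Replaced the ordered wildcard scan over the priority table by staged hash dispatch: three dicts keyed by exact (tier,type) pair, tier only, and type only, chained with `or`; no wildcard matching or rule loop remains.
import Mathlib
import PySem

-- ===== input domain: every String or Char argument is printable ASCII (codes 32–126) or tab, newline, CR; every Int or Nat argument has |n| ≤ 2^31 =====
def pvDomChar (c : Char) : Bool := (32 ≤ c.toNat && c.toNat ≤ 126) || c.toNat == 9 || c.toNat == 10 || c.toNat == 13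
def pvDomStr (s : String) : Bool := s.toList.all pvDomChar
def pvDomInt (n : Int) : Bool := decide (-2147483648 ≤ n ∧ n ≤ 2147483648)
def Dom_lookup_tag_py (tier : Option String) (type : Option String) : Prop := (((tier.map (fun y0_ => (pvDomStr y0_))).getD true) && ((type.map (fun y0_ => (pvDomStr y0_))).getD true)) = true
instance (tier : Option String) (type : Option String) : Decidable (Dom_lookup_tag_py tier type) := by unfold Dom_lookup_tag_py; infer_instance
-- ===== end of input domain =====

-- B replaces A's ordered wildcard-table scan by staged hash dispatch over three dicts (objective: alternative).

-- '(x or "").strip().lower() or None' — shared by both Pythons verbatim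
def pvNorm (s : Option String) : Option String :=
  let t := PySem.Str.lower (PySem.Str.strip (s.getD ""))
  if t == "" then none else some t

-- ===== PORT A =====
def pvTagTable : List ((Option String × Option String) × String) :=
  [((some "immediate", some "notify"), "[Action]"),
   ((some "digest", some "notify"), "[FYI]"),
   ((some "silent", none), "[Audit]"),
   ((none, some "alert"), "[Alert]"),
   ((none, some "inbox_task"), "[Task]")]

def pvTagLoop (tierN typeN : Option String) : List ((Option String × Option String) × String) → String
  | [] => "[Note]"
  | ((wantTier, wantType), tag) :: rest =>
      let tier_ok := wantTier.isNone || wantTier == tierN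
      let type_ok := wantType.isNone || wantType == typeN
      if tier_ok && type_ok then tag else pvTagLoop tierN typeN rest

def lookup_tag_py (tier : Option String) (type : Option String) : String :=
  pvTagLoop (pvNorm tier) (pvNorm type) pvTagTable

-- ===== PORT B =====
-- dict literals with distinct keys: Dict.mk of the pair list is exact
def pvPairTags : PySem.Dict (Option String × Option String) String :=
  PySem.Dict.mk [((some "immediate", some "notify"), "[Action]"),
                 ((some "digest", some "notify"), "[FYI]")]
def pvTierTags : PySem.Dict (Option String) String :=
  PySem.Dict.mk [(some "silent", "[Audit]")]
def pvTypeTags : PySem.Dict (Option String) String :=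
  PySem.Dict.mk [(some "alert", "[Alert]"), (some "inbox_task", "[Task]")]

-- Python's `x or y` on the dict-get results is Option.orElse/getD here: every
-- stored tag is a nonempty (truthy) string, so the chains coincide exactly.
def lookup_tag_py_alt (tier : Option String) (type : Option String) : String :=
  let tier_norm := pvNorm tier
  let type_norm := pvNorm type
  ((((pvPairTags.get? (tier_norm, type_norm)).orElse
      (fun _ => pvTierTags.get? tier_norm)).orElse
      (fun _ => pvTypeTags.get? type_norm)).getD "[Note]")

-- ===== PRECONDITION & SPEC =====
def Spec_lookup_tag_py (tier : Option String) (type : Option String) (out : String) : Prop := out = lookup_tag_py_alt tier type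
instance (tier : Option String) (type : Option String) (out : String) : Decidable (Spec_lookup_tag_py tier type out) := by unfold Spec_lookup_tag_py; infer_instance

-- ===== CLAIM (what is proved, stated in full; the proofs are below) =====
def Claim_equal_lookup_tag_py : Prop := ∀ (tier : Option String) (type : Option String), Dom_lookup_tag_py tier type → Spec_lookup_tag_py tier type (lookup_tag_py tier type)

-- ===== LEMMAS AND PROOFS =====
-- Both sides reduce (by unfolding their own code) to the same 5-way case split
-- on the normalized pair; we compare the two case trees by deciding each branch.
theorem pvBoth_eq (tn yn : Option String) :
    pvTagLoop tn yn pvTagTable =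
      ((((pvPairTags.get? (tn, yn)).orElse (fun _ => pvTierTags.get? tn)).orElse
          (fun _ => pvTypeTags.get? yn)).getD "[Note]") := by
  simp only [pvTagTable, pvTagLoop, pvPairTags, pvTierTags, pvTypeTags,
    PySem.Dict.get?_mk_cons, Option.isNone, Bool.false_or, Bool.true_or, Bool.true_and,
    Bool.and_true]
  by_cases h1 : some "immediate" = tn ∧ some "notify" = yn
  · obtain ⟨h1a, h1b⟩ := h1; subst h1a h1b; decide
  · by_cases h2 : some "digest" = tn ∧ some "notify" = yn
    · obtain ⟨h2a, h2b⟩ := h2; subst h2a h2b; decide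
    · by_cases h3 : some "silent" = tn
      · subst h3
        by_cases h4 : some "notify" = yn
        · subst h4; decide
        · simp_all [PySem.Dict.get?, Option.orElse, Prod.ext_iff]
      · by_cases h5 : some "alert" = yn
        · subst h5; simp_all [PySem.Dict.get?, Option.orElse, Prod.ext_iff]
        · by_cases h6 : some "inbox_task" = yn
          · subst h6; simp_all [PySem.Dict.get?, Option.orElse, Prod.ext_iff]
          · simp_all [PySem.Dict.get?, Option.orElse, Prod.ext_iff]
            split_ifs <;> simp_all

-- ===== VERDICT (by name: the statement is the Claim_ definition above) =====
theorem lookup_tag_py_spec : Claim_equal_lookup_tag_py := by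
  intro tier type _
  unfold Spec_lookup_tag_py lookup_tag_py lookup_tag_py_alt
  exact pvBoth_eq (pvNorm tier) (pvNorm type)
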